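-- pv_equiv track=rewrite | github.com/datrcode/racetrack_svg_framework | framework/racetrack.py | decSVGID
-- ===== SOURCE A (Python) =====
-- def decSVGID(s):
--     if s.startswith('encsvgid_'):
--         s_prime = s[len('encsvgid_'):]
--         _dec    = ''
--         i = 0
--         while i < len(s_prime):
--             c = s_prime[i]
--             if (c >= 'a' and c <= 'z') or \
--                (c >= 'A' and c <= 'Z') or \
--                (c >= '0' and c <= '9'):
--                 _dec += c
--                 i += 1
--             elif c == '_':
--                 _dec += ' '
--                 i += 1
--             elif c == ':':
--                 i += 1
--                 int_str = ''
--                 while i < len(s_prime) and s_prime[i] != ':':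
--                     int_str += s_prime[i]
--                     i += 1
--                 _dec += chr(int(int_str))
--                 i += 1
--             else:
--                 raise Exception(f'decSVGID() - failed to decode "{s}"')
--         return _dec
--     else:
--         return s
-- ===== SOURCE B (Python) =====
-- def decSVGID(s):
--     PFX = 'encsvgid_'
--     if not s.startswith(PFX):
--         return s
--     pieces = []
--     for i, seg in enumerate(s[len(PFX):].split(':')):
--         if i % 2 == 1:
--             pieces.append(chr(int(seg)))
--         else:
--             for c in seg:
--                 if c.isascii() and c.isalnum():
--                     pieces.append(c)
--                 elif c == '_':
--                     pieces.append(' ')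
--                 else:
--                     raise Exception(f'decSVGID() - failed to decode "{s}"')
--     return ''.join(pieces)
-- ===== Notes on version B (the rewrite author's own statement) =====
-- stated objective: simpler
-- what changed: B splits the encoded tail on ':' once and decodes the alternating literal/integer segments with one enumerate pass joined at the end, instead of A's manual-index while loop with a nested inner scan and string concatenation.
import Mathlib
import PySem

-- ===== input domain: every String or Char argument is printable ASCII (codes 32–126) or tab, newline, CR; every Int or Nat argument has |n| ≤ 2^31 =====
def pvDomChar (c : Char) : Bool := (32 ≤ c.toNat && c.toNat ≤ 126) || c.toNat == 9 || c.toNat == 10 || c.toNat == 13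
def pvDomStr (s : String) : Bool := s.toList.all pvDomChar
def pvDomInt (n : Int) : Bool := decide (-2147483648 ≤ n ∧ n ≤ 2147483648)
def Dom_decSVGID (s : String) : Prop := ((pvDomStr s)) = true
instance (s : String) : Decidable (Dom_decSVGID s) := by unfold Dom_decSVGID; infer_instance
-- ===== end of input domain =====

-- B decodes by splitting the encoded tail on ':' once and decoding alternating literal/integer
-- segments, instead of A's manual-index scanning loop; objective: simpler decomposition (same cost).

-- hand port of Python's chr(n), used by both ports: exact for Unicode scalar values; chr raises
-- ValueError for n < 0 or n ≥ 0x110000 (none here), and lone surrogates (which Python chr returns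
-- but a Lean Char cannot hold) are excluded by Pre_decSVGID.
def pyChr? (n : Int) : Option Char :=
  if 0 ≤ n ∧ (n < 55296 ∨ (57344 ≤ n ∧ n < 1114112)) then some (Char.ofNat n.toNat) else none

-- ===== PORT A =====
-- inner while loop: collect chars up to the next ':' (or the end), return them and the rest
def decAInt : List Char → List Char → List Char × List Char
  | [], intStr => (intStr, [])
  | c :: rest, intStr => if c = ':' then (intStr, rest) else decAInt rest (intStr ++ [c])

-- needed by decALoop's termination proof
theorem decAInt_len : ∀ (l acc : List Char), (decAInt l acc).2.length ≤ l.length := by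
  intro l
  induction l with
  | nil => intro acc; simp [decAInt]
  | cons c rest ih =>
    intro acc
    by_cases h : c = ':' <;> simp [decAInt, h]
    exact Nat.le_succ_of_le (ih _)

-- outer while loop of A; none = the Python raises (Exception / ValueError)
def decALoop : List Char → List Char → Option (List Char)
  | [], dec => some dec
  | c :: rest, dec =>
    if ('a' ≤ c ∧ c ≤ 'z') ∨ ('A' ≤ c ∧ c ≤ 'Z') ∨ ('0' ≤ c ∧ c ≤ '9') then
      decALoop rest (dec ++ [c])
    else if c = '_' then
      decALoop rest (dec ++ [' '])
    else if c = ':' then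
      let p := decAInt rest []
      match PySem.Int.ofChars? p.1 with
      | none => none                      -- int(int_str) raises ValueError
      | some n =>
        match pyChr? n with
        | none => none                    -- chr raises / lone surrogate, outside Pre_
        | some ch => decALoop p.2 (dec ++ [ch])
    else none                             -- raise Exception(...)
termination_by l _ => l.length
decreasing_by
  all_goals (have := decAInt_len rest []; simp only [List.length_cons]; omega)

def decSVGID (s : String) : String :=
  if PySem.Str.startswith s "encsvgid_" then
    match decALoop (PySem.List.slice s.toList (some 9) none) [] with
    | some dec => String.ofList dec
    | none => ""                          -- Python raises here; excluded by Pre_decSVGID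
  else s

-- ===== PORT B =====
-- literal (even-indexed) segment: alnum chars kept, '_' -> ' ', anything else raises
def decBLit : List Char → List Char → Option (List Char)
  | [], acc => some acc
  | c :: rest, acc =>
    if decide (c.toNat < 128) && PySem.Chars.isalnum c then decBLit rest (acc ++ [c])
    else if c = '_' then decBLit rest (acc ++ [' '])
    else none

-- one segment: odd index = integer encoding of one character, even index = literal text
def decBSeg (i : Nat) (seg : List Char) : Option (List Char) :=
  if i % 2 = 1 then
    match PySem.Int.ofChars? seg with
    | none => none
    | some n => (pyChr? n).map (fun ch => [ch])
  else decBLit seg []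

-- the enumerate loop over the segments, collecting the decoded pieces
def decBGo : Nat → List (List Char) → Option (List (List Char))
  | _, [] => some []
  | i, seg :: rest =>
    match decBSeg i seg with
    | none => none
    | some p => (decBGo (i + 1) rest).map (fun ps => p :: ps)

def decSVGID_alt (s : String) : String :=
  if PySem.Str.startswith s "encsvgid_" then
    match decBGo 0 (PySem.Chars.splitOn (PySem.List.slice s.toList (some 9) none) [':']) with
    | some pieces => String.ofList pieces.flatten   -- ''.join(pieces)
    | none => ""                          -- B raises here; excluded by Pre_decSVGID
  else s

-- ===== PRECONDITION & SPEC =====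
def pvSegOkEven (seg : List Char) : Bool := seg.all (fun c => PySem.Chars.isalnum c || c == '_')
def pvSegOkOdd (seg : List Char) : Bool :=
  match PySem.Int.ofChars? seg with
  | some n => decide (0 ≤ n ∧ (n < 55296 ∨ (57344 ≤ n ∧ n < 1114112)))
  | none => false

-- Pre_: exactly the inputs where A returns normally (no Exception from a stray character, no
-- ValueError from int() or chr()); it additionally excludes integer segments encoding the lone
-- surrogates 0xD800–0xDFFF, which Python's chr returns but a Lean Char/String cannot represent.
def Pre_decSVGID (s : String) : Prop :=
  PySem.Str.startswith s "encsvgid_" = true →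
    ∀ p ∈ (PySem.Chars.splitOn (PySem.List.slice s.toList (some 9) none) [':']).zipIdx,
      (if p.2 % 2 = 1 then pvSegOkOdd p.1 else pvSegOkEven p.1) = true
instance (s : String) : Decidable (Pre_decSVGID s) := by unfold Pre_decSVGID; infer_instance

def pvWitness_decSVGID : String := "encsvgid_Hello_World:33:ok"

def Spec_decSVGID (s : String) (out : String) : Prop := out = decSVGID_alt s
instance (s : String) (out : String) : Decidable (Spec_decSVGID s out) := by unfold Spec_decSVGID; infer_instance

-- ===== CLAIM (what is proved, stated in full; the proofs are below) =====
def Claim_equal_decSVGID : Prop := ∀ (s : String), Dom_decSVGID s → Pre_decSVGID s → Spec_decSVGID s (decSVGID s)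

-- ===== LEMMAS AND PROOFS =====

-- a structural description of split-on-':' used only by the proofs
def pvSp : List Char → List (List Char)
  | [] => [[]]
  | c :: rest => if c = ':' then [] :: pvSp rest else (pvSp rest).modifyHead (fun h => c :: h)

theorem pvSp_ne_nil (l : List Char) : pvSp l ≠ [] := by
  cases l with
  | nil => simp [pvSp]
  | cons c rest =>
    by_cases h : c = ':' <;> simp [pvSp, h]
    intro hc
    exact pvSp_ne_nil rest hc

theorem pvSplitOn_go_eq (fuel : Nat) :
    ∀ (l cur : List Char) (accs : List (List Char)), l.length < fuel →
      PySem.Chars.splitOn.go [':'] fuel l cur accs =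
        accs.reverse ++ (pvSp l).modifyHead (fun h => cur.reverse ++ h) := by
  induction fuel with
  | zero => intro l cur accs h; omega
  | succ fuel ih =>
    intro l cur accs h
    cases l with
    | nil => simp [PySem.Chars.splitOn.go, pvSp]
    | cons c rest =>
      by_cases hc : c = ':'
      · subst hc
        rw [PySem.Chars.splitOn.go]
        simp only [List.isPrefixOf, beq_self_eq_true, Bool.true_and, if_pos]
        rw [show List.drop ([':'] : List Char).length (':' :: rest) = rest from rfl]
        rw [ih rest [] (cur.reverse :: accs) (by simp at h ⊢; omega)]
        simp [pvSp, List.modifyHead]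
        cases hsp : pvSp rest with
        | nil => exact absurd hsp (pvSp_ne_nil rest)
        | cons a b => simp
      · rw [PySem.Chars.splitOn.go]
        have hpre : [':'].isPrefixOf (c :: rest) = false := by
          simp [List.isPrefixOf]; exact fun hh => hc hh.symm
        rw [hpre]
        simp only [Bool.false_eq_true, if_false]
        rw [ih rest (c :: cur) accs (by simp at h ⊢; omega)]
        simp only [pvSp, if_neg hc]
        cases hsp : pvSp rest with
        | nil => exact absurd hsp (pvSp_ne_nil rest)
        | cons a b => simp

theorem pvSplitOn_eq (l : List Char) : PySem.Chars.splitOn l [':'] = pvSp l := by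
  rw [PySem.Chars.splitOn]
  rw [pvSplitOn_go_eq (l.length + 1) l [] [] (by omega)]
  cases hsp : pvSp l with
  | nil => exact absurd hsp (pvSp_ne_nil l)
  | cons a b => simp

theorem decBLit_append (l : List Char) : ∀ acc, decBLit l acc = (decBLit l []).map (fun r => acc ++ r) := by
  induction l with
  | nil => intro acc; simp [decBLit]
  | cons c rest ih =>
    intro acc
    by_cases h1 : (decide (c.toNat < 128) && PySem.Chars.isalnum c) = true
    · simp only [decBLit, h1, if_true]
      rw [ih (acc ++ [c]), ih ([] ++ [c])]
      cases decBLit rest [] <;> simp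
    · by_cases h2 : c = '_'
      · subst h2
        simp only [decBLit]
        rw [if_neg h1, if_neg h1]; simp only [reduceIte]
        rw [ih (acc ++ [' ']), ih ([] ++ [' '])]
        cases decBLit rest [] <;> simp
      · simp [decBLit, h1, h2]

theorem decBGo_parity (segs : List (List Char)) :
    ∀ i j, i % 2 = j % 2 → decBGo i segs = decBGo j segs := by
  induction segs with
  | nil => intro i j _; simp [decBGo]
  | cons seg rest ih =>
    intro i j hij
    simp only [decBGo, decBSeg, hij]
    rw [ih (i + 1) (j + 1) (by omega)]

theorem pvCharClass (c : Char) :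
    (decide (c.toNat < 128) && PySem.Chars.isalnum c) =
      decide (('a' ≤ c ∧ c ≤ 'z') ∨ ('A' ≤ c ∧ c ≤ 'Z') ∨ ('0' ≤ c ∧ c ≤ '9')) := by
  simp only [PySem.Chars.isalnum, PySem.Chars.isalpha, PySem.Chars.isdigit,
    PySem.Chars.isupper, PySem.Chars.islower, Char.le_def, UInt32.le_iff_toNat_le, Char.toNat]
  rw [Bool.eq_iff_iff]
  simp
  omega

theorem decAInt_no (l : List Char) (hl : ':' ∉ l) : ∀ acc, decAInt l acc = (acc ++ l, []) := by
  induction l with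
  | nil => intro acc; simp [decAInt]
  | cons c rest ih =>
    intro acc
    simp only [List.mem_cons, not_or] at hl
    simp [decAInt, Ne.symm hl.1, ih hl.2]

theorem decAInt_yes (a : List Char) (ha : ':' ∉ a) (b : List Char) :
    ∀ acc, decAInt (a ++ ':' :: b) acc = (acc ++ a, b) := by
  induction a with
  | nil => intro acc; simp [decAInt]
  | cons c rest ih =>
    intro acc
    simp only [List.mem_cons, not_or] at ha
    simp [decAInt, Ne.symm ha.1, ih ha.2]

theorem pvSp_no (l : List Char) (hl : ':' ∉ l) : pvSp l = [l] := by
  induction l with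
  | nil => simp [pvSp]
  | cons c rest ih =>
    simp only [List.mem_cons, not_or] at hl
    simp [pvSp, Ne.symm hl.1, ih hl.2]

theorem pvSp_yes (a : List Char) (ha : ':' ∉ a) (b : List Char) :
    pvSp (a ++ ':' :: b) = a :: pvSp b := by
  induction a with
  | nil => simp [pvSp]
  | cons c rest ih =>
    simp only [List.mem_cons, not_or] at ha
    simp [pvSp, Ne.symm ha.1, ih ha.2]

theorem pvSplitFirst (l : List Char) (h : ':' ∈ l) :
    ∃ a b, l = a ++ ':' :: b ∧ ':' ∉ a := by
  induction l with
  | nil => cases h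
  | cons c rest ih =>
    by_cases hc : c = ':'
    · exact ⟨[], rest, by simp [hc], by simp⟩
    · have hr : ':' ∈ rest := by
        rcases List.mem_cons.mp h with h1 | h1
        · exact absurd h1.symm hc
        · exact h1
      rcases ih hr with ⟨a, b, hab, hna⟩
      exact ⟨c :: a, b, by simp [hab], by simp [not_or]; exact ⟨fun hh => hc hh.symm, hna⟩⟩

-- one literal character prepended to the first segment, seen through decBGo and flatten
theorem decBGo_consHead (c x : Char) (s0 : List Char) (segs : List (List Char))
    (hstep : decBLit (c :: s0) [] = (decBLit s0 []).map (fun r => x :: r)) (dec : List Char) :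
    (decBGo 0 ((c :: s0) :: segs)).map (fun ps => dec ++ ps.flatten) =
      (decBGo 0 (s0 :: segs)).map (fun ps => (dec ++ [x]) ++ ps.flatten) := by
  simp only [decBGo, decBSeg, Nat.zero_mod, hstep]
  cases decBLit s0 [] <;> cases decBGo 1 segs <;> simp

-- the ':'-step: an empty even segment, then an integer segment decoding to one character
theorem decBGo_colon (a : List Char) (segs : List (List Char)) (dec : List Char) :
    (decBGo 0 ([] :: a :: segs)).map (fun ps => dec ++ ps.flatten) =
      (match PySem.Int.ofChars? a with
       | none => none
       | some n =>
         match pyChr? n with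
         | none => none
         | some ch => (decBGo 2 segs).map (fun ps => (dec ++ [ch]) ++ ps.flatten)) := by
  simp only [decBGo, decBSeg, Nat.zero_mod, reduceIte, decBLit, Nat.zero_add]
  cases PySem.Int.ofChars? a with
  | none => simp
  | some n =>
    cases hch : pyChr? n with
    | none => simp [hch]
    | some ch => cases decBGo 2 segs <;> simp [hch]

theorem pvMain (n : Nat) : ∀ (l : List Char), l.length ≤ n → ∀ dec,
    decALoop l dec = (decBGo 0 (pvSp l)).map (fun ps => dec ++ ps.flatten) := by
  induction n with
  | zero =>
    intro l hl dec
    have : l = [] := List.length_eq_zero_iff.mp (Nat.le_zero.mp hl)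
    subst this
    simp [decALoop, pvSp, decBGo, decBSeg, decBLit]
  | succ n ih =>
    intro l hl dec
    cases l with
    | nil => simp [decALoop, pvSp, decBGo, decBSeg, decBLit]
    | cons c rest =>
      obtain ⟨s0, segs, hsp⟩ : ∃ s0 segs, pvSp rest = s0 :: segs := by
        cases hsp : pvSp rest with
        | nil => exact absurd hsp (pvSp_ne_nil rest)
        | cons a b => exact ⟨a, b, rfl⟩
      by_cases hA : ('a' ≤ c ∧ c ≤ 'z') ∨ ('A' ≤ c ∧ c ≤ 'Z') ∨ ('0' ≤ c ∧ c ≤ '9')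
      · -- alphanumeric literal character
        have hb : (decide (c.toNat < 128) && PySem.Chars.isalnum c) = true := by
          rw [pvCharClass]; exact decide_eq_true hA
        have hcc : c ≠ ':' := by rintro rfl; revert hA; decide
        rw [decALoop, if_pos hA]
        rw [ih rest (by simp at hl; omega) (dec ++ [c])]
        simp only [pvSp, if_neg hcc, hsp, List.modifyHead]
        rw [decBGo_consHead c c s0 segs (by
          simp only [decBLit, hb, if_true, List.nil_append]
          rw [decBLit_append s0 [c]]
          rfl) dec]
      · by_cases hu : c = '_'
        · -- underscore becomes a space
          subst hu
          have hb : (decide ('_'.toNat < 128) && PySem.Chars.isalnum '_') = false := by decide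
          rw [decALoop, if_neg hA, if_pos rfl]
          rw [ih rest (by simp at hl; omega) (dec ++ [' '])]
          simp only [pvSp, if_neg (show ('_' : Char) ≠ ':' by decide), hsp, List.modifyHead]
          rw [decBGo_consHead '_' ' ' s0 segs (by
            simp only [decBLit, hb, Bool.false_eq_true, if_false, reduceIte, List.nil_append]
            rw [decBLit_append s0 [' ']]
            rfl) dec]
        · by_cases hc : c = ':'
          · -- integer-encoded character
            subst hc
            rw [decALoop, if_neg hA, if_neg hu, if_pos rfl]
            by_cases hm : ':' ∈ rest
            · obtain ⟨a, b, rfl, hna⟩ := pvSplitFirst rest hm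
              rw [decAInt_yes a hna b []]
              rw [show pvSp (':' :: (a ++ ':' :: b)) = [] :: pvSp (a ++ ':' :: b) from by
                simp [pvSp]]
              rw [pvSp_yes a hna b]
              rw [decBGo_colon a (pvSp b) dec]
              simp only [List.nil_append]
              cases hof : PySem.Int.ofChars? a with
              | none => rfl
              | some m =>
                cases hch : pyChr? m with
                | none => simp [hch]
                | some ch =>
                  simp only [hch]
                  rw [ih b (by simp at hl; omega) (dec ++ [ch])]
                  rw [decBGo_parity (pvSp b) 2 0 (by omega)]
            · rw [decAInt_no rest hm []]
              rw [show pvSp (':' :: rest) = [] :: pvSp rest from by simp [pvSp]]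
              rw [pvSp_no rest hm]
              rw [show ([] :: [rest] : List (List Char)) = [] :: rest :: [] from rfl]
              rw [decBGo_colon rest [] dec]
              simp only [List.nil_append]
              cases hof : PySem.Int.ofChars? rest with
              | none => rfl
              | some m =>
                cases hch : pyChr? m with
                | none => simp [hch]
                | some ch => simp [hch, decALoop, decBGo]
          · -- any other character: both sides fail
            have hb : (decide (c.toNat < 128) && PySem.Chars.isalnum c) = false := by
              rw [pvCharClass]; exact decide_eq_false hA
            rw [decALoop, if_neg hA, if_neg hu, if_neg hc]
            simp only [pvSp, if_neg hc, hsp, List.modifyHead]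
            simp only [decBGo, decBSeg, Nat.zero_mod, decBLit, hb,
              Bool.false_eq_true, if_false, if_neg hu]
            rfl

theorem pvPorts_eq (s : String) : decSVGID s = decSVGID_alt s := by
  unfold decSVGID decSVGID_alt
  by_cases h : PySem.Str.startswith s "encsvgid_" = true
  · rw [if_pos h, if_pos h, pvSplitOn_eq]
    rw [pvMain (PySem.List.slice s.toList (some 9) none).length _ le_rfl []]
    cases decBGo 0 (pvSp (PySem.List.slice s.toList (some 9) none)) <;> simp
  · rw [if_neg h, if_neg h]

-- ===== VERDICT (by name: the statement is the Claim_ definition above) =====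
theorem decSVGID_spec : Claim_equal_decSVGID := by
  intro s _ _
  unfold Spec_decSVGID
  exact pvPorts_eq s
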